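-- pv_equiv track=rewrite | github.com/matheusstutzel/adventOfCode | 2023/11/p1.py | addColumn
-- ===== SOURCE A (Python) =====
-- def addColumn(mat):
--     size = len(mat)
--     nm=[]
--     for i in range(size):
--         nm.append([])
--     for i in range(len(mat[0])):
--         c = True
--         for j in range(size):
--             c = c and mat[j][i] != '#'
--             nm[j].append(mat[j][i])
--         if c:
--             for j in range(size):
--                 nm[j].append('.')
--     return nm
-- ===== SOURCE B (Python) =====
-- def addColumn(mat):
--     w = len(mat[0])
--     empty = [all(row[i] != '#' for row in mat) for i in range(w)]
--     res = []
--     for row in mat: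
--         nr = []
--         for i in range(w):
--             nr.append(row[i])
--             if empty[i]:
--                 nr.append('.')
--         res.append(nr)
--     return res
-- ===== Notes on version B (the rewrite author's own statement) =====
-- stated objective: alternative
-- what changed: B first computes a boolean empty-column index in one pass, then rebuilds the matrix row by row, instead of A's interleaved column-major build that appends to every row slot per column.
import Mathlib
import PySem

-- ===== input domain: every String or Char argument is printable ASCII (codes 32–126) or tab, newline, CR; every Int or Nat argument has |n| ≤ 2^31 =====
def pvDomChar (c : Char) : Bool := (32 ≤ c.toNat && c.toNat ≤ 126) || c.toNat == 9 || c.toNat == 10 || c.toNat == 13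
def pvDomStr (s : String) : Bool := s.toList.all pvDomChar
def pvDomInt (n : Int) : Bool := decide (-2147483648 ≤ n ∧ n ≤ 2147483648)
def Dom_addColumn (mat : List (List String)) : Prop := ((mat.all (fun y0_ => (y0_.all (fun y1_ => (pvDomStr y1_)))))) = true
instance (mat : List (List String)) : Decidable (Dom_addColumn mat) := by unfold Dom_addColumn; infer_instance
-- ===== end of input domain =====

-- B rebuilds the matrix row by row from a precomputed empty-column index, instead of A's
-- interleaved column-major build; equivalence of return values is proved on Pre_ (where A returns).

-- ===== PORT A =====
-- mat[j][i] is ported with PySem.List.pyGetD (exact under Pre_, where every access is in range)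
def addColumnStep (mat : List (List String)) (size : Nat) (nm : List (List String)) (i : Nat) :
    List (List String) :=
  let s := (List.range size).foldl
    (fun (s : Bool × List (List String)) (j : Nat) =>
      let cell := PySem.List.pyGetD (PySem.List.pyGetD mat (j : Int) []) (i : Int) ""
      (s.1 && (cell != "#"), s.2.modify j (fun r => r ++ [cell])))
    (true, nm)
  if s.1 then (List.range size).foldl (fun nm (j : Nat) => nm.modify j (fun r => r ++ ["."])) s.2 else s.2

def addColumn (mat : List (List String)) : List (List String) :=
  let size := mat.length
  let nm := (List.range size).foldl (fun nm _ => nm ++ [([] : List String)]) []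
  (List.range (PySem.List.pyGetD mat (0 : Int) []).length).foldl (addColumnStep mat size) nm

-- ===== PORT B =====
def addColumn_alt (mat : List (List String)) : List (List String) :=
  let w := (PySem.List.pyGetD mat (0 : Int) []).length
  let empty := (List.range w).map
    (fun (i : Nat) => mat.all (fun row => PySem.List.pyGetD row (i : Int) "" != "#"))
  mat.map (fun row =>
    (List.range w).foldl
      (fun nr (i : Nat) =>
        let nr := nr ++ [PySem.List.pyGetD row (i : Int) ""]
        if empty.getD i false then nr ++ ["."] else nr)
      [])

-- ===== PRECONDITION & SPEC =====
-- Pre_ excludes exactly the inputs where Python A raises IndexError: the empty matrix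
-- (mat[0]) and ragged matrices with a row shorter than row 0 (mat[j][i]).
def Pre_addColumn (mat : List (List String)) : Prop :=
  mat ≠ [] ∧ ∀ row ∈ mat, (mat.headD []).length ≤ row.length
instance (mat : List (List String)) : Decidable (Pre_addColumn mat) := by
  unfold Pre_addColumn; infer_instance
def pvWitness_addColumn : List (List String) := [["#", "."], [".", "."]]
def Spec_addColumn (mat : List (List String)) (out : List (List String)) : Prop := out = addColumn_alt mat
instance (mat : List (List String)) (out : List (List String)) : Decidable (Spec_addColumn mat out) := by unfold Spec_addColumn; infer_instance

-- ===== CLAIM (what is proved, stated in full; the proofs are below) =====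
def Claim_equal_addColumn : Prop := ∀ (mat : List (List String)), Dom_addColumn mat → Pre_addColumn mat → Spec_addColumn mat (addColumn mat)

-- ===== LEMMAS AND PROOFS =====

-- the defaulted cell read both ports perform (after pyGetD_natCast)
def pvCell (row : List String) (i : Nat) : String := row.getD i ""

def pvColOK (mat : List (List String)) (i : Nat) : Bool :=
  mat.all (fun row => pvCell row i != "#")

-- the row-wise accumulation both ports are shown to compute
def pvRow (mat : List (List String)) (n : Nat) (row : List String) : List String :=
  (List.range n).foldl
    (fun nr (i : Nat) => if pvColOK mat i then nr ++ [pvCell row i, "."] else nr ++ [pvCell row i]) []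

-- a fold of a pair whose components do not interact splits
theorem pv_foldl_pair {α β γ : Type} (l : List γ) (F : α × β → γ → α × β)
    (f1 : α → γ → α) (f2 : β → γ → β) (hF : ∀ s j, F s j = (f1 s.1 j, f2 s.2 j))
    (a : α) (b : β) :
    l.foldl F (a, b) = (l.foldl f1 a, l.foldl f2 b) := by
  induction l generalizing a b with
  | nil => rfl
  | cons x xs ih => simp only [List.foldl_cons, hF]; exact ih (f1 a x) (f2 b x)

-- the Boolean accumulator of A's inner loop is an 'all' over the first n rows
theorem pv_foldl_all {α : Type} (l : List α) (d : α) (p : α → Bool) (n : Nat)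
    (hn : n ≤ l.length) (a : Bool) :
    (List.range n).foldl (fun c j => c && p (l.getD j d)) a = (a && (l.take n).all p) := by
  induction n generalizing a with
  | zero => simp
  | succ n ih =>
    have h : n < l.length := by omega
    rw [List.range_succ, List.foldl_append, ih (by omega)]
    simp only [List.foldl_cons, List.foldl_nil, List.take_succ, List.all_append,
      List.getElem?_eq_getElem h, Option.toList_some, List.all_cons, List.all_nil,
      List.getD_eq_getElem?_getD, Option.getD_some, Bool.and_assoc, Bool.and_true]

-- a fold of in-place modifications at indices 0..l.length-1 is a mapIdx
theorem pv_foldl_modify {α : Type} (l : List α) (f : Nat → α → α) (n : Nat)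
    (hn : n ≤ l.length) :
    (List.range n).foldl (fun acc j => acc.modify j (f j)) l =
      l.mapIdx (fun j a => if j < n then f j a else a) := by
  induction n with
  | zero =>
    apply List.ext_getElem <;> simp
  | succ n ih =>
    rw [List.range_succ, List.foldl_append, ih (by omega)]
    simp only [List.foldl_cons, List.foldl_nil]
    apply List.ext_getElem
    · simp [List.length_modify]
    · intro k hk hk'
      rw [List.getElem_modify]
      simp only [List.getElem_mapIdx]
      by_cases h : n = k
      · subst h; simp
      · by_cases h2 : k < n
        · simp [h, h2, show k < n + 1 by omega]
        · simp [h, h2, show ¬ k < n + 1 by omega]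

-- mapIdx over (mat.map f) reading mat.getD at the same index acts row-wise
theorem pv_mapIdx_map {α β : Type} (mat : List α) (dflt : α) (f : α → β)
    (g : α → β → β) :
    (mat.map f).mapIdx (fun j r => g (mat.getD j dflt) r) =
      mat.map (fun row => g row (f row)) := by
  apply List.ext_getElem
  · simp
  · intro k hk hk'
    have hk2 : k < mat.length := by simpa using hk
    simp [List.getElem_mapIdx, List.getD_eq_getElem?_getD, List.getElem?_eq_getElem hk2]

-- one column step of A, on a list of row accumulators of the right length
theorem pv_step (mat : List (List String)) (i : Nat) (nm : List (List String))
    (h : nm.length = mat.length) :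
    addColumnStep mat mat.length nm i =
      nm.mapIdx (fun j r =>
        if pvColOK mat i then r ++ [pvCell (mat.getD j []) i, "."]
        else r ++ [pvCell (mat.getD j []) i]) := by
  unfold addColumnStep
  simp only [PySem.List.pyGetD_natCast]
  have hp := pv_foldl_pair (List.range mat.length)
    (fun (s : Bool × List (List String)) (j : Nat) =>
      (s.1 && ((mat.getD j []).getD i "" != "#"), s.2.modify j (fun r => r ++ [(mat.getD j []).getD i ""])))
    (fun c (j : Nat) => c && ((mat.getD j []).getD i "" != "#"))
    (fun acc (j : Nat) => acc.modify j (fun r => r ++ [(mat.getD j []).getD i ""]))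
    (fun s j => rfl) true nm
  rw [hp]
  rw [pv_foldl_all mat [] (fun row => (row.getD i "" != "#")) mat.length le_rfl true]
  simp only [List.take_length, Bool.true_and]
  rw [show (fun (acc : List (List String)) (j : Nat) =>
        acc.modify j fun r => r ++ [(mat.getD j []).getD i ""]) =
      (fun acc j => acc.modify j ((fun j r => r ++ [pvCell (mat.getD j []) i]) j)) from rfl]
  rw [pv_foldl_modify nm _ mat.length (le_of_eq h.symm)]
  have htrim : nm.mapIdx (fun j r => if j < mat.length then r ++ [pvCell (mat.getD j []) i] else r)
      = nm.mapIdx (fun j r => r ++ [pvCell (mat.getD j []) i]) := by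
    apply List.ext_getElem
    · simp
    · intro k h1 h2
      have hk : k < mat.length := by simp at h1; omega
      simp [List.getElem_mapIdx, hk]
  rw [htrim]
  by_cases hc : pvColOK mat i
  · have hcc : mat.all (fun row => row.getD i "" != "#") = true := by
      simpa [pvColOK, pvCell] using hc
    rw [if_pos hcc]
    rw [show (fun (nm : List (List String)) (j : Nat) => nm.modify j fun r => r ++ ["."]) =
        (fun nm j => nm.modify j ((fun (_ : Nat) (r : List String) => r ++ ["."]) j)) from rfl]
    rw [pv_foldl_modify _ _ mat.length (by simp [h]), List.mapIdx_mapIdx]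
    apply List.ext_getElem
    · simp
    · intro k h1 h2
      have hk : k < mat.length := by simp at h1; omega
      simp [List.getElem_mapIdx, hk, hc]
  · have hcc : ¬ mat.all (fun row => row.getD i "" != "#") = true := by
      simpa [pvColOK, pvCell] using hc
    rw [if_neg hcc]
    apply List.ext_getElem
    · simp
    · intro k h1 h2
      simp [List.getElem_mapIdx, hc]

-- A's initialisation loop builds a list of empty rows
theorem pv_init (n : Nat) (acc : List (List String)) :
    (List.range n).foldl (fun nm _ => nm ++ [([] : List String)]) acc =
      acc ++ List.replicate n [] := by
  induction n with
  | zero => simp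
  | succ n ih => rw [List.range_succ, List.foldl_append, ih]; simp [List.replicate_succ']

-- the main fold of A equals the row-wise build, column by column
theorem pv_main (mat : List (List String)) (n : Nat) :
    (List.range n).foldl (addColumnStep mat mat.length) (List.replicate mat.length []) =
      mat.map (pvRow mat n) := by
  induction n with
  | zero =>
    apply List.ext_getElem
    · simp
    · intro k h1 h2
      simp [pvRow]
  | succ n ih =>
    rw [List.range_succ, List.foldl_append, ih]
    simp only [List.foldl_cons, List.foldl_nil]
    rw [pv_step mat n _ (by simp)]
    rw [pv_mapIdx_map mat [] (pvRow mat n)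
      (fun row r => if pvColOK mat n then r ++ [pvCell row n, "."] else r ++ [pvCell row n])]
    apply List.map_congr_left
    intro row _
    unfold pvRow
    rw [List.range_succ, List.foldl_append]
    simp only [List.foldl_cons, List.foldl_nil]

-- B's empty-column table looked up at i < w is pvColOK
theorem pv_empty_getD (mat : List (List String)) (w i : Nat) (hi : i < w) :
    (((List.range w).map (fun i => mat.all (fun row => row.getD i "" != "#"))).getD i false) =
      pvColOK mat i := by
  rw [List.getD_eq_getElem?_getD]
  simp [hi, pvColOK, pvCell]

theorem addColumn_spec_aux (mat : List (List String)) : addColumn mat = addColumn_alt mat := by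
  unfold addColumn addColumn_alt
  simp only [PySem.List.pyGetD_natCast, PySem.List.pyGetD_zero]
  rw [pv_init mat.length []]
  simp only [List.nil_append]
  rw [pv_main mat (mat.getD 0 []).length]
  apply List.map_congr_left
  intro row _
  unfold pvRow
  apply PySem.List.foldl_congr_mem
  intro nr i hi
  have hiw : i < (mat.getD 0 []).length := List.mem_range.mp hi
  rw [pv_empty_getD mat _ i hiw]
  by_cases hc : pvColOK mat i
  · simp [hc, pvCell]
  · simp [hc, pvCell]

-- ===== VERDICT (by name: the statement is the Claim_ definition above) =====
theorem addColumn_spec : Claim_equal_addColumn := by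
  intro mat _ _
  unfold Spec_addColumn
  exact addColumn_spec_aux mat
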